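-- pv_equiv track=rewrite | github.com/dzemildzigal/OS-VideoSDR | protocol/validation.py | is_frame_complete
-- ===== SOURCE A (Python) =====
-- from typing import Iterable, List
--
-- def is_frame_complete(received_segment_ids: Iterable[int], segment_count: int) -> bool:
--     if segment_count <= 0:
--         return False
--
--     seen = set(received_segment_ids)
--     if len(seen) != segment_count:
--         return False
--
--     for idx in range(segment_count):
--         if idx not in seen:
--             return False
--
--     return True
-- ===== SOURCE B (Python) =====
-- def is_frame_complete(received_segment_ids, segment_count):
--     # One pass over the ids marking a coverage bitmap; no set(), no range scan.
--     if segment_count <= 0: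
--         return False
--     ids = list(received_segment_ids)
--     if segment_count > len(ids):
--         return False  # fewer ids than segments: cannot cover them all
--     seen = [False] * segment_count
--     count = 0
--     for x in ids:
--         if not (0 <= x < segment_count):
--             return False
--         if not seen[x]:
--             seen[x] = True
--             count += 1
--     return count == segment_count
-- ===== Notes on version B (the rewrite author's own statement) =====
-- stated objective: alternative
-- what changed: Replaces A's set() construction plus a length check and a range-membership scan with a single pass over the ids that marks a boolean coverage bitmap and counts newly seen in-range ids, returning early on any out-of-range id.
import Mathlib
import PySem

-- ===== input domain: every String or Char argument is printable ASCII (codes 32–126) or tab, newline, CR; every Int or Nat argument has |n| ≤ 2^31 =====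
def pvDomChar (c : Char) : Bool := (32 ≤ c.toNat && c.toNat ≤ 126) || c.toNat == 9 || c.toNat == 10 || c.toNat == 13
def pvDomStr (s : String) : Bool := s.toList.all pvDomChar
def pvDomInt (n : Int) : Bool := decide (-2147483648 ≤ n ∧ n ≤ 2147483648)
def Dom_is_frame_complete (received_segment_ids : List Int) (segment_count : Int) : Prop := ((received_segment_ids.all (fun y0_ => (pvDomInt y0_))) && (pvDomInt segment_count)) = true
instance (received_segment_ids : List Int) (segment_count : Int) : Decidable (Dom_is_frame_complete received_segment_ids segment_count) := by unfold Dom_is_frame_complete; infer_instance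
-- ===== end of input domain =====

-- B replaces A's set()+length check+range scan by a single pass over the ids marking a
-- boolean coverage bitmap and counting newly seen in-range ids (objective: alternative).

-- ===== PORT A =====
def is_frame_complete (received_segment_ids : List Int) (segment_count : Int) : Bool :=
  if segment_count ≤ 0 then false
  else
    let seen := PySem.Set.ofList received_segment_ids
    if PySem.Set.len seen ≠ segment_count then false
    else
      -- for idx in range(segment_count): if idx not in seen: return False / return True
      (PySem.List.pyRange 0 segment_count 1).all (fun idx => PySem.Set.contains seen idx)

-- ===== PORT B =====
-- the for-loop of Source B: state = (seen bitmap, count); early `return False` on out-of-range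
def pvGoB (n : Int) : List Int → List Bool → Int → Bool
  | [], _, count => count == n
  | x :: rest, seen, count =>
    if 0 ≤ x ∧ x < n then
      if PySem.List.pyGetD seen x false then pvGoB n rest seen count
      else pvGoB n rest (PySem.List.pySetD seen x true) (count + 1)
    else false

def is_frame_complete_alt (received_segment_ids : List Int) (segment_count : Int) : Bool :=
  if segment_count ≤ 0 then false
  else if (received_segment_ids.length : Int) < segment_count then false
  else pvGoB segment_count received_segment_ids (List.replicate segment_count.toNat false) 0

-- ===== PRECONDITION & SPEC =====
def Spec_is_frame_complete (received_segment_ids : List Int) (segment_count : Int) (out : Bool) : Prop := out = is_frame_complete_alt received_segment_ids segment_count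
instance (received_segment_ids : List Int) (segment_count : Int) (out : Bool) : Decidable (Spec_is_frame_complete received_segment_ids segment_count out) := by unfold Spec_is_frame_complete; infer_instance

-- ===== CLAIM (what is proved, stated in full; the proofs are below) =====
def Claim_equal_is_frame_complete : Prop := ∀ (received_segment_ids : List Int) (segment_count : Int), Dom_is_frame_complete received_segment_ids segment_count → Spec_is_frame_complete received_segment_ids segment_count (is_frame_complete received_segment_ids segment_count)

-- ===== LEMMAS AND PROOFS =====

-- the bitmap (range n).map (i ↦ i ∈ S) updated at x (fresh) is the bitmap of S ++ [x]
lemma pv_bitmap_set (n : Int) (S : List Int) (x : Int) (hx0 : 0 ≤ x) (hxn : x < n) :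
    PySem.List.pySetD ((List.range n.toNat).map (fun i : Nat => decide ((i : Int) ∈ S))) x true
      = (List.range n.toNat).map (fun i : Nat => decide ((i : Int) ∈ S ++ [x])) := by
  rw [PySem.List.pySetD_of_nonneg _ _ hx0]
  apply List.ext_getElem
  · simp
  · intro i h1 h2
    simp only [List.getElem_set, List.getElem_map, List.getElem_range] at *
    have hxlt : x.toNat < n.toNat := by omega
    by_cases hix : i = x.toNat
    · subst hix
      simp [List.mem_append, Int.toNat_of_nonneg hx0]
    · simp only [List.mem_append, List.mem_singleton]
      have : (i : Int) ≠ x := by omega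
      simp [this]
      intro hc
      exact absurd hc (by omega)

lemma pv_goB_spec (n : Int) (xs : List Int) (S : List Int) (hnd : S.Nodup)
    (hS : ∀ x ∈ S, 0 ≤ x ∧ x < n) :
    pvGoB n xs ((List.range n.toNat).map (fun i : Nat => decide ((i : Int) ∈ S))) (S.length : Int)
      = ((xs.all fun x => decide (0 ≤ x ∧ x < n))
          && (((PySem.Set.update S xs).length : Int) == n)) := by
  induction xs generalizing S with
  | nil => simp [pvGoB, PySem.Set.update]
  | cons x rest ih =>
    by_cases h : 0 ≤ x ∧ x < n
    · have hxlt : x.toNat < n.toNat := by omega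
      have hget : PySem.List.pyGetD ((List.range n.toNat).map (fun i : Nat => decide ((i : Int) ∈ S))) x false
          = decide (x ∈ S) := by
        rw [PySem.List.pyGetD_eq_getElem _ _ h.1 (by simp; omega)]
        simp [List.getElem_map, List.getElem_range, Int.toNat_of_nonneg h.1]
      by_cases hmem : x ∈ S
      · have hadd : PySem.Set.add S x = S := by
          simp [PySem.Set.add, PySem.Set.contains, hmem]
        simp only [pvGoB, if_pos h, hget, hmem, decide_true, if_true]
        rw [ih S hnd hS]
        simp [PySem.Set.update, h, hadd, List.all_cons]
      · have hadd : PySem.Set.add S x = S ++ [x] := by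
          simp [PySem.Set.add, PySem.Set.contains, hmem]
        have hnd' : (S ++ [x]).Nodup := by
          simp [List.nodup_append, hnd]
          intro a ha hax
          exact hmem (hax ▸ ha)
        have hS' : ∀ y ∈ S ++ [x], 0 ≤ y ∧ y < n := by
          intro y hy
          rcases List.mem_append.mp hy with hy | hy
          · exact hS y hy
          · rw [List.mem_singleton] at hy; subst hy; exact h
        simp only [pvGoB, if_pos h, hget, hmem, decide_false, Bool.false_eq_true, if_false]
        rw [pv_bitmap_set n S x h.1 h.2]
        have hc : (S.length : Int) + 1 = ((S ++ [x]).length : Int) := by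
          simp
        rw [hc, ih (S ++ [x]) hnd' hS']
        simp [PySem.Set.update, h, hadd, List.all_cons]
    · simp [pvGoB, List.all_cons, h]

lemma pv_alt_char (ids : List Int) (n : Int) (hn : 0 < n) :
    is_frame_complete_alt ids n
      = ((ids.all fun x => decide (0 ≤ x ∧ x < n))
          && (((PySem.Set.ofList ids).length : Int) == n)) := by
  unfold is_frame_complete_alt
  rw [if_neg (by omega)]
  by_cases hbig : (ids.length : Int) < n
  · rw [if_pos hbig]
    have hle : (PySem.Set.ofList ids).length ≤ ids.length := PySem.Set.length_ofList_le ids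
    have hne : (((PySem.Set.ofList ids).length : Int) == n) = false := by
      simp
      omega
    simp [hne]
  rw [if_neg hbig]
  have h0 : List.replicate n.toNat false
      = (List.range n.toNat).map (fun i : Nat => decide ((i : Int) ∈ ([] : List Int))) := by
    simp
  have h1 : (0 : Int) = ((List.length ([] : List Int)) : Int) := by simp
  rw [h0, h1, pv_goB_spec n ids [] (by simp) (by simp)]
  simp [PySem.Set.update, PySem.Set.ofList_eq_foldl]

-- pigeonhole: a nodup list of ints inside [0,n) of length n contains all of [0,n), and conversely
lemma pv_finset_char (S : List Int) (n : Int) (hn : 0 < n) (hnd : S.Nodup)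
    (hlen : (S.length : Int) = n) :
    ((∀ i : Int, 0 ≤ i → i < n → i ∈ S) ↔ (∀ x ∈ S, 0 ≤ x ∧ x < n)) := by
  have hcardT : S.toFinset.card = S.length := List.toFinset_card_of_nodup hnd
  have hcardI : (Finset.Ico (0 : Int) n).card = n.toNat := by
    rw [Int.card_Ico]; simp
  constructor
  · intro h x hx
    have hsub : Finset.Ico (0 : Int) n ⊆ S.toFinset := by
      intro i hi
      rw [Finset.mem_Ico] at hi
      exact List.mem_toFinset.mpr (h i hi.1 hi.2)
    have heq : Finset.Ico (0 : Int) n = S.toFinset :=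
      Finset.eq_of_subset_of_card_le hsub (by omega)
    have : x ∈ Finset.Ico (0 : Int) n := by
      rw [heq]; exact List.mem_toFinset.mpr hx
    rw [Finset.mem_Ico] at this
    exact this
  · intro h i h0 h1
    have hsub : S.toFinset ⊆ Finset.Ico (0 : Int) n := by
      intro x hx
      rw [Finset.mem_Ico]
      exact h x (List.mem_toFinset.mp hx)
    have heq : S.toFinset = Finset.Ico (0 : Int) n :=
      Finset.eq_of_subset_of_card_le hsub (by omega)
    have : i ∈ S.toFinset := by
      rw [heq, Finset.mem_Ico]; exact ⟨h0, h1⟩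
    exact List.mem_toFinset.mp this

-- ===== VERDICT (by name: the statement is the Claim_ definition above) =====
theorem is_frame_complete_spec : Claim_equal_is_frame_complete := by
  intro ids n _
  unfold Spec_is_frame_complete
  by_cases hn : n ≤ 0
  · unfold is_frame_complete is_frame_complete_alt
    rw [if_pos hn, if_pos hn]
  · have hn' : 0 < n := by omega
    rw [pv_alt_char ids n hn']
    unfold is_frame_complete
    rw [if_neg hn]
    set S := PySem.Set.ofList ids with hSdef
    have hmemS : ∀ x, x ∈ S ↔ x ∈ ids := fun x => PySem.Set.mem_ofList ids x
    have hnd : S.Nodup := PySem.Set.nodup_ofList ids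
    by_cases hlen : PySem.Set.len S ≠ n
    · rw [if_pos hlen]
      have : ¬ (((S.length : Int)) == n) = true := by
        simp [PySem.Set.len] at hlen ⊢; exact hlen
      simp only [] at *
      cases hb : (((S.length : Int)) == n) with
      | false => simp
      | true => exact absurd hb this
    · rw [if_neg hlen]
      rw [not_not] at hlen
      have hlen' : (S.length : Int) = n := by simpa [PySem.Set.len] using hlen
      have hiff := pv_finset_char S n hn' hnd hlen'
      have hiff2 : (∀ i : Int, 0 ≤ i → i < n → i ∈ ids) ↔ (∀ x ∈ ids, 0 ≤ x ∧ x < n) := by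
        constructor
        · intro h x hx
          exact (hiff.mp (fun i h0 h1 => (hmemS i).mpr (h i h0 h1))) x ((hmemS x).mpr hx)
        · intro h i h0 h1
          exact (hmemS i).mp (hiff.mpr (fun x hx => h x ((hmemS x).mp hx)) i h0 h1)
      rw [Bool.eq_iff_iff]
      simp only [Bool.and_eq_true, List.all_eq_true, decide_eq_true_eq, beq_iff_eq,
        PySem.Set.contains, PySem.List.mem_pyRange_one, List.contains_eq_mem, hmemS]
      constructor
      · intro h
        refine ⟨fun x hx => hiff2.mp (fun i h0 h1 => h i ⟨h0, h1⟩) x hx, hlen'⟩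
      · intro h i hi
        exact hiff2.mpr h.1 i hi.1 hi.2
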